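-- pv_equiv track=rewrite | github.com/yao-jz/intra-kernel-profiler | scripts/annotate_source.py | pick_display_metrics
-- ===== SOURCE A (Python) =====
-- from collections import defaultdict
--
-- def pick_display_metrics(by_line):
--     """Choose the most informative metrics to display."""
--     # Count how many lines have each metric
--     metric_coverage = defaultdict(int)
--     for line_num, info in by_line.items():
--         for m in info["metrics"]:
--             metric_coverage[m] += 1
--
--     # Priority order
--     priority = [
--         "smsp__sass_inst_executed",
--         "smsp__sass_thread_inst_executed",
--         "smsp__sass_thread_inst_executed_pred_on",
--         "smsp__sass_inst_executed_op_fp32",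
--         "smsp__sass_inst_executed_op_integer",
--         "smsp__sass_inst_executed_op_memory",
--         "smsp__sass_inst_executed_op_control",
--     ]
--
--     selected = []
--     for m in priority:
--         if metric_coverage.get(m, 0) > 0:
--             selected.append(m)
--
--     # Add remaining metrics sorted by coverage
--     for m, count in sorted(metric_coverage.items(), key=lambda x: -x[1]):
--         if m not in selected:
--             selected.append(m)
--
--     return selected[:5]  # Show at most 5 columns
-- ===== SOURCE B (Python) =====
-- def pick_display_metrics(by_line):
--     """Choose the most informative metrics to display."""
--     priority = [
--         "smsp__sass_inst_executed",
--         "smsp__sass_thread_inst_executed",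
--         "smsp__sass_thread_inst_executed_pred_on",
--         "smsp__sass_inst_executed_op_fp32",
--         "smsp__sass_inst_executed_op_integer",
--         "smsp__sass_inst_executed_op_memory",
--         "smsp__sass_inst_executed_op_control",
--     ]
--     coverage = {}
--     for info in by_line.values():
--         for m in info["metrics"]:
--             coverage[m] = coverage.get(m, 0) + 1
--     # one stable sort with a composite key: priority metrics first (by priority
--     # rank), then the rest by descending coverage (ties keep insertion order)
--     def rank(m):
--         if m in priority:
--             return (0, priority.index(m))
--         return (1, -coverage[m])
--     return sorted(coverage, key=rank)[:5]
-- ===== Notes on version B (the rewrite author's own statement) =====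
-- stated objective: simpler
-- what changed: Replaces A's two selection passes (priority scan, then a coverage-sorted append guarded by a list-membership test) with one stable sort of the distinct metrics under a composite key: (0, priority rank) for priority metrics, (1, -coverage) for the rest.
import Mathlib
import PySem

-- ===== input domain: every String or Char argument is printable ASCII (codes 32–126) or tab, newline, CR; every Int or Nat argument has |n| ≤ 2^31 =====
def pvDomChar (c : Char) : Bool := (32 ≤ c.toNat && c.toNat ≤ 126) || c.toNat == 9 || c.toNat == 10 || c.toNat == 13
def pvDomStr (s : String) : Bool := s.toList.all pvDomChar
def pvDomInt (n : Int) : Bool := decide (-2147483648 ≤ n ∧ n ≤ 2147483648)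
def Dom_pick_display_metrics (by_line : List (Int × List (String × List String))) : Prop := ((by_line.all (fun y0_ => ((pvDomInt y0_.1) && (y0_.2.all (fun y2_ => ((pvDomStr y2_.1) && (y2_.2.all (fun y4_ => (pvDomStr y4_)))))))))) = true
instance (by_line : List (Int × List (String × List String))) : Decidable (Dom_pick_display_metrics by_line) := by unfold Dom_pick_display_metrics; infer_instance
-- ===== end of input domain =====

-- B replaces A's two selection passes (priority scan + coverage-sorted append with a
-- membership test) by ONE stable sort of the distinct metrics under a composite rank;
-- objective: simpler.

-- the priority table (module constant shared by both versions)
def pvPriority : List String :=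
  [ "smsp__sass_inst_executed",
    "smsp__sass_thread_inst_executed",
    "smsp__sass_thread_inst_executed_pred_on",
    "smsp__sass_inst_executed_op_fp32",
    "smsp__sass_inst_executed_op_integer",
    "smsp__sass_inst_executed_op_memory",
    "smsp__sass_inst_executed_op_control" ]

-- ===== PORT A =====
-- info["metrics"] is ported as `(Dict.ofList info).getD "metrics" []`: exact whenever the
-- key is present (guaranteed by Pre_); where Python raises KeyError, nothing is claimed.
def pick_display_metrics (by_line : List (Int × List (String × List String))) : List String :=
  let metric_coverage : PySem.Dict String Int :=
    by_line.foldl (fun d p =>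
      ((PySem.Dict.ofList p.2).getD "metrics" []).foldl
        (fun d m => d.modify m 0 (· + 1)) d)
      PySem.Dict.empty
  let selected : List String :=
    pvPriority.foldl (fun sel m => if metric_coverage.getD m 0 > 0 then sel ++ [m] else sel) []
  let selected : List String :=
    (PySem.List.sorted metric_coverage.items (fun x => -x.2) false).foldl
      (fun sel p => if sel.contains p.1 then sel else sel ++ [p.1]) selected
  selected.take 5

-- ===== PORT B =====
def pick_display_metrics_alt (by_line : List (Int × List (String × List String))) : List String :=
  let coverage : PySem.Dict String Int :=
    by_line.foldl (fun d p =>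
      ((PySem.Dict.ofList p.2).getD "metrics" []).foldl
        (fun d m => d.insert m (d.getD m 0 + 1)) d)
      PySem.Dict.empty
  -- rank(m) = (0, priority.index(m)) if m in priority else (1, -coverage[m])
  (PySem.List.sorted2 coverage.keys
      (fun m => if pvPriority.contains m then (0 : Int) else 1)
      (fun m => if pvPriority.contains m
                then (((PySem.List.index? pvPriority m).getD 0 : Nat) : Int)
                else -(coverage.getD m 0))
      false).take 5

-- ===== PRECONDITION & SPEC =====
-- Pre_ excludes exactly the inputs on which A raises KeyError: a line whose info dict has
-- no "metrics" key (B raises there too).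
def Pre_pick_display_metrics (by_line : List (Int × List (String × List String))) : Prop :=
  ∀ p ∈ by_line, p.2.any (fun q => q.1 == "metrics") = true
instance (by_line : List (Int × List (String × List String))) : Decidable (Pre_pick_display_metrics by_line) := by unfold Pre_pick_display_metrics; infer_instance

def pvWitness_pick_display_metrics : (List (Int × List (String × List String))) :=
  [(1, [("metrics", ["smsp__sass_inst_executed", "custom_metric"])]),
   (2, [("metrics", ["custom_metric"])])]

def Spec_pick_display_metrics (by_line : List (Int × List (String × List String))) (out : List String) : Prop := out = pick_display_metrics_alt by_line
instance (by_line : List (Int × List (String × List String))) (out : List String) : Decidable (Spec_pick_display_metrics by_line out) := by unfold Spec_pick_display_metrics; infer_instance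

-- ===== CLAIM (what is proved, stated in full; the proofs are below) =====
def Claim_equal_pick_display_metrics : Prop := ∀ (by_line : List (Int × List (String × List String))), Dom_pick_display_metrics by_line → Pre_pick_display_metrics by_line → Spec_pick_display_metrics by_line (pick_display_metrics by_line)

-- ===== LEMMAS AND PROOFS =====

-- the flattened stream of metric occurrences, in program order
def pvStream (by_line : List (Int × List (String × List String))) : List String :=
  by_line.flatMap (fun p => (PySem.Dict.ofList p.2).getD "metrics" [])

theorem pv_witness_ok : Dom_pick_display_metrics pvWitness_pick_display_metrics ∧ Pre_pick_display_metrics pvWitness_pick_display_metrics := by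
  constructor <;> decide

-- ---- generic facts about insertBy / sorted (stable insertion sort) ----

theorem pv_insertBy_append_right {α : Type} (before : α → α → Bool) (x : α) (us vs : List α)
    (h : ∀ v ∈ vs, before x v = true) :
    PySem.List.insertBy before x (us ++ vs) = PySem.List.insertBy before x us ++ vs := by
  induction us with
  | nil =>
    cases vs with
    | nil => rfl
    | cons v vs' => simp [PySem.List.insertBy, h v (by simp)]
  | cons u us' ih =>
    by_cases hu : before x u = true <;> simp [PySem.List.insertBy, hu, ih]

theorem pv_insertBy_append_left {α : Type} (before : α → α → Bool) (x : α) (us vs : List α)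
    (h : ∀ u ∈ us, before x u = false) :
    PySem.List.insertBy before x (us ++ vs) = us ++ PySem.List.insertBy before x vs := by
  induction us with
  | nil => rfl
  | cons u us' ih =>
    have hu : before x u = false := h u (by simp)
    simp [PySem.List.insertBy, hu]
    exact ih (fun u hu' => h u (by simp [hu']))

theorem pv_insertBy_congr {α : Type} (before before' : α → α → Bool) (x : α) (ys : List α)
    (h : ∀ y ∈ ys, before x y = before' x y) :
    PySem.List.insertBy before x ys = PySem.List.insertBy before' x ys := by
  induction ys with
  | nil => rfl
  | cons y ys' ih =>
    have hy := h y (by simp)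
    by_cases hb : before x y = true
    · simp [PySem.List.insertBy, hb, hy ▸ hb]
    · have : before' x y = false := by rw [← hy]; simpa using hb
      simp [PySem.List.insertBy, hb, this]
      exact ih (fun y hy' => h y (by simp [hy']))

theorem pv_insertBy_map {α β : Type} (before : β → β → Bool) (f : α → β) (x : α) (ys : List α) :
    PySem.List.insertBy before (f x) (ys.map f) =
      (PySem.List.insertBy (fun a b => before (f a) (f b)) x ys).map f := by
  induction ys with
  | nil => rfl
  | cons y ys' ih =>
    by_cases hb : before (f x) (f y) = true <;> simp [PySem.List.insertBy, hb, ih]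

theorem pv_sorted_map {α β κ : Type} [LinearOrder κ] (f : α → β) (key : β → κ) (xs : List α) :
    PySem.List.sorted (xs.map f) key false =
      (PySem.List.sorted xs (fun a => key (f a)) false).map f := by
  rw [PySem.List.sorted_eq_foldl_insertBy, PySem.List.sorted_eq_foldl_insertBy, List.foldl_map]
  suffices h : ∀ (ys : List α),
      List.foldl (fun acc x => PySem.List.insertBy (fun a b => decide (key a < key b)) (f x) acc)
        (ys.map f) xs =
      (List.foldl (fun acc x =>
        PySem.List.insertBy (fun a b => decide (key (f a) < key (f b))) x acc) ys xs).map f by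
    simpa using h []
  induction xs with
  | nil => intro ys; rfl
  | cons x xs' ih =>
    intro ys
    simp only [List.foldl_cons]
    rw [pv_insertBy_map]
    exact ih _

theorem pv_sorted_congr {α κ : Type} [LinearOrder κ] (key key' : α → κ) (xs : List α)
    (h : ∀ y ∈ xs, key y = key' y) :
    PySem.List.sorted xs key false = PySem.List.sorted xs key' false := by
  induction xs using List.reverseRecOn with
  | nil => rfl
  | append_singleton xs x ih =>
    rw [PySem.List.sorted_eq_foldl_insertBy, PySem.List.sorted_eq_foldl_insertBy,
      List.foldl_append, List.foldl_append]
    simp only [List.foldl_cons, List.foldl_nil]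
    rw [← PySem.List.sorted_eq_foldl_insertBy, ← PySem.List.sorted_eq_foldl_insertBy,
      ih (fun y hy => h y (by simp [hy]))]
    apply pv_insertBy_congr
    intro y hy
    have hyx : y ∈ xs := by
      have := (PySem.List.mem_sorted xs key' false y).1 hy
      exact this
    rw [h x (by simp), h y (by simp [hyx])]

theorem pv_insertBy_filter_neg {α : Type} (before : α → α → Bool) (q : α → Bool) (x : α)
    (S : List α) (hx : q x = false) :
    (PySem.List.insertBy before x S).filter q = S.filter q := by
  induction S with
  | nil => simp [PySem.List.insertBy, hx]
  | cons y t ih =>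
    by_cases hb : before x y = true <;> by_cases hq : q y = true <;>
      simp [PySem.List.insertBy, hb, hx, hq, ih]

theorem pv_insertBy_filter_pos {α κ : Type} [LinearOrder κ] (key : α → κ) (q : α → Bool) (x : α)
    (S : List α) (hx : q x = true) (hS : S.Pairwise (fun a b => key a ≤ key b)) :
    (PySem.List.insertBy (fun a b => decide (key a < key b)) x S).filter q =
      PySem.List.insertBy (fun a b => decide (key a < key b)) x (S.filter q) := by
  induction S with
  | nil => simp [PySem.List.insertBy, hx]
  | cons y t ih =>
    obtain ⟨hy, ht⟩ := List.pairwise_cons.1 hS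
    by_cases hb : key x < key y
    · rw [show PySem.List.insertBy (fun a b => decide (key a < key b)) x (y :: t)
          = x :: y :: t by simp [PySem.List.insertBy, hb]]
      rw [show (x :: y :: t).filter q = x :: (y :: t).filter q by
        simp [List.filter_cons, hx]]
      cases hc : (y :: t).filter q with
      | nil => rfl
      | cons z w =>
        have hzmem : z ∈ y :: t := List.mem_of_mem_filter (hc ▸ List.mem_cons_self)
        have hz : key x < key z := by
          rcases List.mem_cons.1 hzmem with rfl | hzt
          · exact hb
          · exact lt_of_lt_of_le hb (hy z hzt)
        simp [PySem.List.insertBy, hz]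
    · have hb' : (decide (key x < key y)) = false := by simpa using hb
      rw [show PySem.List.insertBy (fun a b => decide (key a < key b)) x (y :: t)
          = y :: PySem.List.insertBy (fun a b => decide (key a < key b)) x t by
        simp [PySem.List.insertBy, hb']]
      by_cases hq : q y = true
      · rw [show (y :: PySem.List.insertBy (fun a b => decide (key a < key b)) x t).filter q
            = y :: (PySem.List.insertBy (fun a b => decide (key a < key b)) x t).filter q by
          simp [hq]]
        rw [show (y :: t).filter q = y :: t.filter q by simp [hq]]
        rw [ih ht]
        simp [PySem.List.insertBy, hb']
      · have hq' : q y = false := by simpa using hq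
        rw [show (y :: PySem.List.insertBy (fun a b => decide (key a < key b)) x t).filter q
            = (PySem.List.insertBy (fun a b => decide (key a < key b)) x t).filter q by
          simp [hq']]
        rw [show (y :: t).filter q = t.filter q by simp [hq']]
        exact ih ht

theorem pv_sorted_filter {α κ : Type} [LinearOrder κ] (key : α → κ) (q : α → Bool) (xs : List α) :
    (PySem.List.sorted xs key false).filter q = PySem.List.sorted (xs.filter q) key false := by
  induction xs using List.reverseRecOn with
  | nil => rfl
  | append_singleton xs x ih =>
    have hstep : PySem.List.sorted (xs ++ [x]) key false
        = PySem.List.insertBy (fun a b => decide (key a < key b)) x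
            (PySem.List.sorted xs key false) := by
      rw [PySem.List.sorted_eq_foldl_insertBy, PySem.List.sorted_eq_foldl_insertBy,
        List.foldl_append]
      rfl
    rw [hstep]
    by_cases hq : q x = true
    · rw [pv_insertBy_filter_pos key q x _ hq (PySem.List.sorted_pairwise xs key), ih]
      rw [show (xs ++ [x]).filter q = xs.filter q ++ [x] by simp [List.filter_append, hq]]
      rw [PySem.List.sorted_eq_foldl_insertBy, PySem.List.sorted_eq_foldl_insertBy,
        List.foldl_append]
      rfl
    · have hq' : q x = false := by simpa using hq
      rw [pv_insertBy_filter_neg _ q x _ hq', ih]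
      rw [show (xs ++ [x]).filter q = xs.filter q by simp [List.filter_append, hq']]

-- splitting a stable sort under a two-valued leading key
theorem pv_sorted2_split {α : Type} (f : α → Bool) (k2 : α → Int) (xs : List α) :
    PySem.List.sorted2 xs (fun a => if f a then (0 : Int) else 1) k2 false =
      PySem.List.sorted (xs.filter f) k2 false ++
      PySem.List.sorted (xs.filter (fun a => !f a)) k2 false := by
  induction xs using List.reverseRecOn with
  | nil => rfl
  | append_singleton xs x ih =>
    have hstep : PySem.List.sorted2 (xs ++ [x]) (fun a => if f a then (0 : Int) else 1) k2 false
        = PySem.List.insertBy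
            (fun a b => decide ((if f a then (0:Int) else 1) < (if f b then (0:Int) else 1)) ||
              (!decide ((if f b then (0:Int) else 1) < (if f a then (0:Int) else 1)) &&
                decide (k2 a < k2 b))) x
            (PySem.List.sorted2 xs (fun a => if f a then (0 : Int) else 1) k2 false) := by
      show List.foldl _ [] (xs ++ [x]) = _
      rw [List.foldl_append]
      rfl
    rw [hstep, ih]
    have hmem0 : ∀ y ∈ PySem.List.sorted (xs.filter f) k2 false, f y = true := by
      intro y hy
      have := (PySem.List.mem_sorted _ k2 false y).1 hy
      exact (List.mem_filter.1 this).2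
    have hmem1 : ∀ y ∈ PySem.List.sorted (xs.filter (fun a => !f a)) k2 false, f y = false := by
      intro y hy
      have := (PySem.List.mem_sorted _ k2 false y).1 hy
      simpa using (List.mem_filter.1 this).2
    by_cases hx : f x = true
    · rw [pv_insertBy_append_right _ x _ _ (by intro v hv; simp [hx, hmem1 v hv])]
      rw [pv_insertBy_congr _ (fun a b => decide (k2 a < k2 b)) x _
        (by intro y hy; simp [hx, hmem0 y hy])]
      rw [show (xs ++ [x]).filter f = xs.filter f ++ [x] by simp [List.filter_append, hx]]
      rw [show (xs ++ [x]).filter (fun a => !f a) = xs.filter (fun a => !f a) by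
        simp [List.filter_append, hx]]
      congr 1
      rw [PySem.List.sorted_eq_foldl_insertBy, PySem.List.sorted_eq_foldl_insertBy,
        List.foldl_append]
      rfl
    · have hx' : f x = false := by simpa using hx
      rw [pv_insertBy_append_left _ x _ _ (by intro u hu; simp [hx', hmem0 u hu])]
      rw [pv_insertBy_congr _ (fun a b => decide (k2 a < k2 b)) x _
        (by intro y hy; simp [hx', hmem1 y hy])]
      rw [show (xs ++ [x]).filter f = xs.filter f by simp [List.filter_append, hx']]
      rw [show (xs ++ [x]).filter (fun a => !f a) = xs.filter (fun a => !f a) ++ [x] by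
        simp [List.filter_append, hx']]
      congr 1
      rw [PySem.List.sorted_eq_foldl_insertBy, PySem.List.sorted_eq_foldl_insertBy,
        List.foldl_append]
      rfl

-- A's second loop: appending keys not yet selected, over a key-nodup list
theorem pv_foldl_dedup_append {α β : Type} [BEq α] [LawfulBEq α] (g : β → α) (ms : List β)
    (acc : List α) (hnd : (ms.map g).Nodup) :
    ms.foldl (fun sel m => if sel.contains (g m) then sel else sel ++ [g m]) acc =
      acc ++ (ms.map g).filter (fun m => !acc.contains m) := by
  induction ms generalizing acc with
  | nil => simp
  | cons m ms' ih =>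
    simp only [List.map_cons, List.nodup_cons] at hnd
    obtain ⟨hm, hnd'⟩ := hnd
    simp only [List.foldl_cons, List.map_cons, List.filter_cons]
    by_cases hc : acc.contains (g m) = true
    · rw [if_pos hc, ih acc hnd']
      have hmem : g m ∈ acc := by simpa using hc
      have hifc : (!acc.contains (g m)) = false := by simp [hmem]
      rw [hifc]
      simp
    · rw [if_neg hc, ih (acc ++ [g m]) hnd']
      have hc' : acc.contains (g m) = false := by simpa using hc
      have hfc : (ms'.map g).filter (fun z => !(acc ++ [g m]).contains z)
          = (ms'.map g).filter (fun z => !acc.contains z) := by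
        apply List.filter_congr
        intro z hz
        have hzm : g m ≠ z := by
          intro h
          exact hm (h ▸ hz)
        simp [List.contains_eq_mem, Ne.symm hzm]
      rw [hfc]
      have hnmem : g m ∉ acc := by simpa using hc
      simp [hnmem]

-- the rank-comparison table of the priority list, proved once by computation
theorem pv_priority_pairwise :
    pvPriority.Pairwise (fun a b => pvPriority.contains a = true ∧ pvPriority.contains b = true ∧
      (((PySem.List.index? pvPriority a).getD 0 : Nat) : Int) <
      (((PySem.List.index? pvPriority b).getD 0 : Nat) : Int)) := by
  decide

theorem pv_priority_nodup : pvPriority.Nodup := by decide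

-- ---- main equivalence ----

theorem pv_main (by_line : List (Int × List (String × List String))) :
    pick_display_metrics by_line = pick_display_metrics_alt by_line := by
  have hA_cov : by_line.foldl (fun d p =>
      ((PySem.Dict.ofList p.2).getD "metrics" []).foldl
        (fun d m => d.modify m 0 (· + 1)) d) PySem.Dict.empty
      = PySem.Dict.counter (pvStream by_line) := by
    rw [PySem.Dict.counter_eq_foldl, pvStream, List.flatMap_def, List.foldl_flatten,
      List.foldl_map]
  have hB_cov : by_line.foldl (fun d p =>
      ((PySem.Dict.ofList p.2).getD "metrics" []).foldl
        (fun d m => d.insert m (d.getD m 0 + 1)) d) PySem.Dict.empty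
      = PySem.Dict.counter (pvStream by_line) := by
    rw [← PySem.Dict.foldl_insert_getD_add_one_eq_counter, pvStream, List.flatMap_def,
      List.foldl_flatten, List.foldl_map]
  simp only [pick_display_metrics, pick_display_metrics_alt]
  rw [hA_cov, hB_cov]
  simp only [PySem.Dict.getD_counter, PySem.Dict.items_counter, PySem.Dict.keys_counter]
  generalize pvStream by_line = M
  -- abbreviations (all definitional)
  show List.take 5
      (List.foldl (fun sel p => if sel.contains p.1 = true then sel else sel ++ [p.1])
        (List.foldl (fun sel m => if (0:Int) < (List.count m M : Int) then sel ++ [m] else sel)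
          [] pvPriority)
        (PySem.List.sorted
          ((PySem.Set.ofList M).map (fun k => (k, (List.count k M : Int)))) (fun x => -x.2) false))
    = List.take 5 (PySem.List.sorted2 (PySem.Set.ofList M)
        (fun m => if pvPriority.contains m = true then (0:Int) else 1)
        (fun m => if pvPriority.contains m = true
                  then (((PySem.List.index? pvPriority m).getD 0 : Nat) : Int)
                  else -(List.count m M : Int)) false)
  congr 1
  rw [PySem.List.foldl_append_ite_eq_filter (fun m => (0:Int) < (List.count m M : Int))
    pvPriority [], List.nil_append]
  have hKnodup : (PySem.Set.ofList M).Nodup := PySem.Set.nodup_ofList M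
  have hnd : ((PySem.List.sorted
      ((PySem.Set.ofList M).map (fun k => (k, (List.count k M : Int)))) (fun x => -x.2)
      false).map (fun p => p.1)).Nodup := by
    have hperm := (PySem.List.sorted_perm
      ((PySem.Set.ofList M).map (fun k => (k, (List.count k M : Int)))) (fun x => -x.2) false).map
      (fun p => (p.1 : String))
    refine hperm.symm.nodup ?_
    rw [List.map_map, show ((fun (p : String × Int) => p.1) ∘
      (fun k => (k, (List.count k M : Int)))) = id from rfl, List.map_id]
    exact hKnodup
  have hded := pv_foldl_dedup_append (fun p : String × Int => p.1)
    (PySem.List.sorted ((PySem.Set.ofList M).map (fun k => (k, (List.count k M : Int))))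
      (fun x => -x.2) false)
    (List.filter (fun x => decide ((0:Int) < (List.count x M : Int))) pvPriority) hnd
  rw [hded]
  rw [pv_sorted_map (fun k => ((k, (List.count k M : Int)) : String × Int)) (fun x => -x.2)
    (PySem.Set.ofList M)]
  rw [List.map_map, show ((fun (p : String × Int) => p.1) ∘
    (fun k => (k, (List.count k M : Int)))) = id from rfl, List.map_id]
  rw [pv_sorted2_split (fun m => pvPriority.contains m)
    (fun m => if pvPriority.contains m = true
              then (((PySem.List.index? pvPriority m).getD 0 : Nat) : Int)
              else -(List.count m M : Int)) (PySem.Set.ofList M)]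
  show List.filter (fun x => decide ((0:Int) < (List.count x M : Int))) pvPriority ++
      List.filter
        (fun m => !(List.filter (fun x => decide ((0:Int) < (List.count x M : Int))) pvPriority).contains m)
        (PySem.List.sorted (PySem.Set.ofList M) (fun a => -(List.count a M : Int)) false)
    = (PySem.List.sorted ((PySem.Set.ofList M).filter (fun m => pvPriority.contains m))
        (fun m => if pvPriority.contains m = true
                  then (((PySem.List.index? pvPriority m).getD 0 : Nat) : Int)
                  else -(List.count m M : Int)) false) ++
      (PySem.List.sorted ((PySem.Set.ofList M).filter (fun a => !pvPriority.contains a))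
        (fun m => if pvPriority.contains m = true
                  then (((PySem.List.index? pvPriority m).getD 0 : Nat) : Int)
                  else -(List.count m M : Int)) false)
  have hpart0 : PySem.List.sorted ((PySem.Set.ofList M).filter (fun m => pvPriority.contains m))
      (fun m => if pvPriority.contains m = true
                then (((PySem.List.index? pvPriority m).getD 0 : Nat) : Int)
                else -(List.count m M : Int)) false
      = List.filter (fun x => decide ((0:Int) < (List.count x M : Int))) pvPriority := by
    apply PySem.List.sorted_eq_of_perm_of_pairwise_lt
    · rw [List.perm_ext_iff_of_nodup (pv_priority_nodup.filter _) (hKnodup.filter _)]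
      intro a
      simp only [List.mem_filter, PySem.Set.mem_ofList, List.contains_eq_mem,
        decide_eq_true_eq, Int.natCast_pos, List.count_pos_iff]
      tauto
    · have h := pv_priority_pairwise.filter
        (fun x => decide ((0:Int) < (List.count x M : Int)))
      refine h.imp ?_
      intro a b hab
      obtain ⟨ha, hb, hlt⟩ := hab
      show (if pvPriority.contains a = true
            then (((PySem.List.index? pvPriority a).getD 0 : Nat) : Int)
            else -(List.count a M : Int)) <
          (if pvPriority.contains b = true
            then (((PySem.List.index? pvPriority b).getD 0 : Nat) : Int)
            else -(List.count b M : Int))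
      rw [if_pos ha, if_pos hb]
      exact hlt
  have hcongr1 : List.filter
        (fun m => !(List.filter (fun x => decide ((0:Int) < (List.count x M : Int))) pvPriority).contains m)
        (PySem.List.sorted (PySem.Set.ofList M) (fun a => -(List.count a M : Int)) false)
      = List.filter (fun m => !pvPriority.contains m)
        (PySem.List.sorted (PySem.Set.ofList M) (fun a => -(List.count a M : Int)) false) := by
    apply List.filter_congr
    intro m hm
    have hmM : m ∈ M := (PySem.Set.mem_ofList M m).1
      ((PySem.List.mem_sorted _ _ _ m).1 hm)
    have hpos : (0:Int) < (List.count m M : Int) := by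
      exact_mod_cast List.count_pos_iff.2 hmM
    simp [List.contains_eq_mem, List.mem_filter, hmM]
  have hpart1 : PySem.List.sorted ((PySem.Set.ofList M).filter (fun a => !pvPriority.contains a))
      (fun m => if pvPriority.contains m = true
                then (((PySem.List.index? pvPriority m).getD 0 : Nat) : Int)
                else -(List.count m M : Int)) false
      = List.filter
        (fun m => !(List.filter (fun x => decide ((0:Int) < (List.count x M : Int))) pvPriority).contains m)
        (PySem.List.sorted (PySem.Set.ofList M) (fun a => -(List.count a M : Int)) false) := by
    rw [hcongr1, pv_sorted_filter]
    apply pv_sorted_congr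
    intro y hy
    have hyc : pvPriority.contains y = false := by
      simpa using (List.mem_filter.1 hy).2
    show (if pvPriority.contains y = true
          then (((PySem.List.index? pvPriority y).getD 0 : Nat) : Int)
          else -(List.count y M : Int)) = -(List.count y M : Int)
    rw [if_neg (by simpa using hyc)]
  rw [hpart0, hpart1]



-- ===== VERDICT (by name: the statement is the Claim_ definition above) =====
theorem pick_display_metrics_spec : Claim_equal_pick_display_metrics := by
  intro by_line _ _
  unfold Spec_pick_display_metrics
  exact pv_main by_line
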